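-- pv_equiv track=rewrite | github.com/posl/comment_recommendation | script/split_gen/5_time/en/128_D/8.py | solve
-- ===== SOURCE A (Python) =====
-- def solve(n,k,vs):
--     ans = 0
--     for i in range(min(n+1,k+1)):
--         for j in range(min(n+1-i,k+1-i)):
--             l = vs[:i]
--             r = vs[n-j:]
--             l.extend(r)
--             l.sort()
--             for x in range(min(len(l),k-i-j)):
--                 if l[x] < 0:
--                     l[x] = 0
--             ans = max(ans,sum(l))
--     return ans
-- ===== SOURCE B (Python) =====
-- def solve(n, k, vs):
--     # For each left-count i, sweep j upward, incrementally maintaining the selected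
--     # sum and an ascending sorted list of the (at most budget) smallest negatives,
--     # instead of re-slicing and re-sorting for every (i, j) pair.
--     m = len(vs)
--     ans = 0
--     for i in range(min(n + 1, k + 1)):
--         total = sum(vs[:i]) + sum(vs[n:])
--         negs = sorted(x for x in vs[:i] + vs[n:] if x < 0)
--         S = sum(negs)
--         for j in range(min(n + 1 - i, k + 1 - i)):
--             if j > 0:
--                 p = n - j
--                 if p < m:
--                     x = vs[p]
--                     total += x
--                     if x < 0:
--                         # binary-search insertion keeping negs ascending
--                         lo, hi = 0, len(negs)
--                         while lo < hi:
--                             mid = (lo + hi) // 2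
--                             if negs[mid] <= x:
--                                 lo = mid + 1
--                             else:
--                                 hi = mid
--                         negs.insert(lo, x)
--                         S += x
--             while len(negs) > k - i - j:
--                 S -= negs.pop()
--             cand = total - S
--             if cand > ans:
--                 ans = cand
--     return ans
-- ===== Notes on version B (the rewrite author's own statement) =====
-- stated objective: faster
-- what changed: A re-slices, re-sorts and re-scans the whole selection for every (i,j) pair; B fixes the left count i once and sweeps j incrementally, maintaining the running selected sum and a binary-search-insertion sorted list truncated to the k-i-j smallest negatives, so no per-pair sort or rebuild happens.
import Mathlib
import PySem

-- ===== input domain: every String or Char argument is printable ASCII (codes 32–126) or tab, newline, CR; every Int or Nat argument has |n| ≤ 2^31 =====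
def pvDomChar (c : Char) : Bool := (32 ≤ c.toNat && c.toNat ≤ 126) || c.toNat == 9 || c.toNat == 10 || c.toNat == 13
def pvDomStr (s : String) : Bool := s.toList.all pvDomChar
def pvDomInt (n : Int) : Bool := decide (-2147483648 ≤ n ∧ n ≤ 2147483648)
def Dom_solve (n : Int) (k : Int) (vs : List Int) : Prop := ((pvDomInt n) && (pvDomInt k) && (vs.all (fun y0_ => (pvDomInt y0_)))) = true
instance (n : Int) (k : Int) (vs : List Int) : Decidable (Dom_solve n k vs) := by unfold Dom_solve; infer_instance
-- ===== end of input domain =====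

-- B replaces A's per-pair slice+sort+zero-loop by, per left-count i, an incremental sweep over j
-- maintaining the selected sum and a truncated sorted list of the smallest negatives (faster).

-- ===== PORT A =====
def solve (n : Int) (k : Int) (vs : List Int) : Int :=
  (PySem.List.pyRange 0 (min (n+1) (k+1)) 1).foldl (fun ans i =>
    (PySem.List.pyRange 0 (min (n+1-i) (k+1-i)) 1).foldl (fun ans j =>
      let l := PySem.List.slice vs none (some i)
      let r := PySem.List.slice vs (some (n-j)) none
      let l := l ++ r
      let l := PySem.List.sorted l (fun x => x) false
      let l := (PySem.List.pyRange 0 (min (l.length : Int) (k-i-j)) 1).foldl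
        (fun l x => if PySem.List.pyGetD l x 0 < 0 then PySem.List.pySetD l x 0 else l) l
      max ans l.sum) ans) 0

-- ===== PORT B =====
-- port of Source B's hand-written binary search (the `while lo < hi` loop)
def bsearchLoop (negs : List Int) (x : Int) (lo hi : Int) : Int :=
  if h : lo < hi then
    let mid := PySem.Int.floordiv (lo + hi) 2
    if PySem.List.pyGetD negs mid 0 ≤ x then bsearchLoop negs x (mid + 1) hi
    else bsearchLoop negs x lo mid
  else lo
termination_by (hi - lo).toNat
decreasing_by
  · have h1 := (PySem.Int.floordiv_two_mid_bounds (le_of_lt h)).1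
    have h2 : PySem.Int.floordiv (lo + hi) 2 < hi := by
      rw [PySem.Int.floordiv_lt_iff_lt_mul (by omega)]; omega
    omega
  · have h1 := (PySem.Int.floordiv_two_mid_bounds (le_of_lt h)).1
    have h2 : PySem.Int.floordiv (lo + hi) 2 < hi := by
      rw [PySem.Int.floordiv_lt_iff_lt_mul (by omega)]; omega
    omega

-- port of Source B's `while len(negs) > k - i - j: S -= negs.pop()` (nonempty check is a totality guard;
-- the cap is never negative when the loop runs)
def popLoop (cap : Int) (negs : List Int) (S : Int) : List Int × Int :=
  if hne : negs ≠ [] then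
    if cap < (negs.length : Int) then
      popLoop cap negs.dropLast (S - negs.getLast hne)
    else (negs, S)
  else (negs, S)
termination_by negs.length
decreasing_by
  have h0 : negs.length ≠ 0 := fun h0 => hne (List.eq_nil_of_length_eq_zero h0)
  simp only [List.length_dropLast]
  omega

def solve_alt (n : Int) (k : Int) (vs : List Int) : Int :=
  let m := vs.length
  (PySem.List.pyRange 0 (min (n+1) (k+1)) 1).foldl (fun ans i =>
    let total0 := (PySem.List.slice vs none (some i)).sum + (PySem.List.slice vs (some n) none).sum
    let negs0 := PySem.List.sorted
      ((PySem.List.slice vs none (some i) ++ PySem.List.slice vs (some n) none).filter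
        (fun x => decide (x < 0))) (fun x => x) false
    let S0 := negs0.sum
    let st := (PySem.List.pyRange 0 (min (n+1-i) (k+1-i)) 1).foldl (fun st j =>
      let st1 :=
        if j > 0 then
          let p := n - j
          if p < (m : Int) then
            let x := PySem.List.pyGetD vs p 0
            let total := st.1 + x
            if x < 0 then
              let lo := bsearchLoop st.2.1 x 0 (st.2.1.length : Int)
              (total, PySem.List.insert st.2.1 lo x, st.2.2.1 + x)
            else (total, st.2.1, st.2.2.1)
          else (st.1, st.2.1, st.2.2.1)
        else (st.1, st.2.1, st.2.2.1)
      let ps := popLoop (k - i - j) st1.2.1 st1.2.2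
      let cand := st1.1 - ps.2
      (st1.1, ps.1, ps.2, if cand > st.2.2.2 then cand else st.2.2.2))
      (total0, negs0, S0, ans)
    st.2.2.2) 0

-- ===== PRECONDITION & SPEC =====
def Spec_solve (n : Int) (k : Int) (vs : List Int) (out : Int) : Prop := out = solve_alt n k vs
instance (n : Int) (k : Int) (vs : List Int) (out : Int) : Decidable (Spec_solve n k vs out) := by unfold Spec_solve; infer_instance

-- ===== CLAIM (what is proved, stated in full; the proofs are below) =====
def Claim_equal_solve : Prop := ∀ (n : Int) (k : Int) (vs : List Int), Dom_solve n k vs → Spec_solve n k vs (solve n k vs)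

-- ===== LEMMAS AND PROOFS =====

-- the sorted list of the negative elements of l
def negSort (l : List Int) : List Int :=
  PySem.List.sorted (l.filter (fun x => decide (x < 0))) (fun x => x) false

-- the selected sublist at pair (i, j) (p = n - j)
def selList (i p : Int) (vs : List Int) : List Int :=
  PySem.List.slice vs none (some i) ++ PySem.List.slice vs (some p) none

-- common value of both programs at one (i,j) pair: selected sum with the t smallest negatives zeroed
def gval (l : List Int) (t : Int) : Int := l.sum - ((negSort l).take t.toNat).sum

-- sorted insertion (what Source B's binary search + insert performs)
def insSorted (x : Int) (s : List Int) : List Int :=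
  s.takeWhile (fun v => decide (v ≤ x)) ++ x :: s.dropWhile (fun v => decide (v ≤ x))

-- A's inner value at (i,j)
def aVal (n k : Int) (vs : List Int) (i j : Int) : Int :=
  (let l := PySem.List.slice vs none (some i)
   let r := PySem.List.slice vs (some (n-j)) none
   let l := l ++ r
   let l := PySem.List.sorted l (fun x => x) false
   let l := (PySem.List.pyRange 0 (min (l.length : Int) (k-i-j)) 1).foldl
     (fun l x => if PySem.List.pyGetD l x 0 < 0 then PySem.List.pySetD l x 0 else l) l
   l).sum

theorem solve_eq_fold (n k : Int) (vs : List Int) :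
    solve n k vs = (PySem.List.pyRange 0 (min (n+1) (k+1)) 1).foldl (fun ans i =>
      (PySem.List.pyRange 0 (min (n+1-i) (k+1-i)) 1).foldl
        (fun ans j => max ans (aVal n k vs i j)) ans) 0 := rfl

theorem zero_fold_eq (s : List Int) (N : Nat) :
    (PySem.List.pyRange 0 (N : Int) 1).foldl
      (fun l x => if PySem.List.pyGetD l x 0 < 0 then PySem.List.pySetD l x 0 else l) s
    = (s.take N).map (fun v => if v < 0 then 0 else v) ++ s.drop N := by
  induction N with
  | zero => simp [PySem.List.pyRange_one_eq_nil]
  | succ N ih =>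
    have hc : ((N + 1 : Nat) : Int) = (N : Int) + 1 := by push_cast; ring
    rw [hc, PySem.List.pyRange_one_succ_right (by positivity), List.foldl_append, ih]
    simp only [List.foldl_cons, List.foldl_nil]
    by_cases hN : N < s.length
    · have hlenA : ((s.take N).map (fun v : Int => if v < 0 then 0 else v)).length = N := by
        simp [List.length_take]; omega
      have hdrop : s.drop N = s[N] :: s.drop (N + 1) := (List.getElem_cons_drop hN).symm
      have hget : PySem.List.pyGetD
          ((s.take N).map (fun v : Int => if v < 0 then 0 else v) ++ s.drop N) (N : Int) 0 = s[N] := by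
        rw [PySem.List.pyGetD_natCast, List.getD_append_right _ _ _ _ (by rw [hlenA]), hlenA,
          Nat.sub_self, hdrop]
        rfl
      rw [hget]
      have htake : s.take (N + 1) = s.take N ++ [s[N]] := by
        rw [List.take_add_one]
        simp [List.getElem?_eq_getElem hN]
      by_cases hneg : s[N] < 0
      · rw [if_pos hneg, PySem.List.pySetD_natCast, hdrop,
          List.set_append_right _ _ hlenA.le, hlenA, Nat.sub_self, List.set_cons_zero,
          htake, List.map_append]
        simp only [List.map_cons, List.map_nil, if_pos hneg, List.append_assoc,
          List.singleton_append]
      · rw [if_neg hneg, htake, List.map_append, hdrop]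
        simp only [List.map_cons, List.map_nil, if_neg hneg, List.append_assoc,
          List.singleton_append]
    · have hlen : s.length ≤ N := by omega
      have hget : PySem.List.pyGetD
          ((s.take N).map (fun v : Int => if v < 0 then 0 else v) ++ s.drop N) (N : Int) 0 = 0 := by
        rw [PySem.List.pyGetD_natCast]
        apply List.getD_eq_default
        simp [List.length_take, List.length_drop]; omega
      rw [hget]
      simp only [lt_irrefl, if_false]
      rw [List.take_of_length_le hlen, List.take_of_length_le (by omega),
        List.drop_eq_nil_of_le hlen, List.drop_eq_nil_of_le (by omega)]

theorem sum_map_zero_neg (l : List Int) :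
    (l.map (fun v => if v < 0 then 0 else v)).sum
      = l.sum - (l.filter (fun v => decide (v < 0))).sum := by
  induction l with
  | nil => simp
  | cons a t ih =>
    by_cases h : a < 0 <;> (simp [h, ih]; try ring)

theorem sorted_decomp (l : List Int) :
    PySem.List.sorted l (fun x => x) false
      = negSort l ++ PySem.List.sorted (l.filter (fun x => decide (¬ x < 0))) (fun x => x) false := by
  apply PySem.List.sorted_id_eq_of_perm_of_pairwise
  · have h1 : (negSort l).Perm (l.filter (fun x => decide (x < 0))) :=
      PySem.List.sorted_perm _ _ _
    have h2 : (PySem.List.sorted (l.filter (fun x => decide (¬ x < 0))) (fun x => x) false).Perm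
        (l.filter (fun x => decide (¬ x < 0))) := PySem.List.sorted_perm _ _ _
    have h3 : (l.filter (fun x => decide (x < 0)) ++ l.filter (fun x => decide (¬ x < 0))).Perm l := by
      have := List.filter_append_perm (fun x => decide (x < 0)) l
      have he : (fun x : Int => !decide (x < 0)) = (fun x : Int => decide (¬ x < 0)) := by
        funext x; by_cases h : x < 0 <;> simp [h]
      rwa [he] at this
    exact ((h1.append h2).trans h3)
  · rw [List.pairwise_append]
    refine ⟨PySem.List.sorted_pairwise _ _, PySem.List.sorted_pairwise _ _, ?_⟩
    intro a ha b hb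
    have ha' : a < 0 := by
      have := ((PySem.List.mem_sorted _ _ _ _).mp ha)
      simp only [List.mem_filter, decide_eq_true_eq] at this
      exact this.2
    have hb' : ¬ b < 0 := by
      have := ((PySem.List.mem_sorted _ _ _ _).mp hb)
      simp only [List.mem_filter, decide_eq_true_eq] at this
      exact this.2
    omega

theorem aVal_eq_gval (n k : Int) (vs : List Int) (i j : Int) (ht : 0 ≤ k - i - j) :
    aVal n k vs i j = gval (selList i (n - j) vs) (k - i - j) := by
  unfold aVal gval selList
  dsimp only
  set l := PySem.List.slice vs none (some i) ++ PySem.List.slice vs (some (n-j)) none with hl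
  set s := PySem.List.sorted l (fun x => x) false with hs
  set t := k - i - j with htdef
  set N : Nat := (min ((s.length : Int)) t).toNat with hN
  have hrange : min ((s.length : Int)) t = ((N : Nat) : Int) := by
    have : (0:Int) ≤ min ((s.length : Int)) t := by
      have : (0:Int) ≤ (s.length : Int) := by positivity
      omega
    omega
  rw [hrange, zero_fold_eq s N, List.sum_append, sum_map_zero_neg]
  have hperm : s.Perm l := PySem.List.sorted_perm _ _ _
  have hsum : s.sum = l.sum := hperm.sum_eq
  have hsum2 : (s.take N).sum + (s.drop N).sum = s.sum := by
    rw [← List.sum_append, List.take_append_drop]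
  have hclen : (negSort l).length ≤ l.length := by
    unfold negSort
    rw [PySem.List.length_sorted]
    exact List.length_filter_le _ _
  have hslen : s.length = l.length := by rw [hs, PySem.List.length_sorted]
  have hfilter : (s.take N).filter (fun v => decide (v < 0)) = (negSort l).take N := by
    rw [hs, sorted_decomp l, List.take_append, List.filter_append]
    have h1 : (List.filter (fun v => decide (v < 0)) ((negSort l).take N)) = (negSort l).take N := by
      rw [List.filter_eq_self]
      intro a ha
      have ha' := List.mem_of_mem_take ha
      unfold negSort at ha'
      have := (PySem.List.mem_sorted _ _ _ _).mp ha'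
      simp only [List.mem_filter] at this
      exact this.2
    have h2 : (List.filter (fun v => decide (v < 0))
        ((PySem.List.sorted (l.filter (fun x => decide (¬ x < 0))) (fun x => x) false).take
          (N - (negSort l).length))) = [] := by
      rw [List.filter_eq_nil_iff]
      intro a ha
      have ha' := List.mem_of_mem_take ha
      have := (PySem.List.mem_sorted _ _ _ _).mp ha'
      simp only [List.mem_filter, decide_eq_true_eq] at this ⊢
      exact this.2
    rw [h1, h2, List.append_nil]
  rw [hfilter]
  have hkey : ((negSort l).take N).sum = ((negSort l).take t.toNat).sum := by
    by_cases hts : t ≤ (s.length : Int)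
    · have : N = t.toNat := by omega
      rw [this]
    · have hNl : N = s.length := by omega
      have h1 : (negSort l).take N = negSort l :=
        List.take_of_length_le (by omega)
      have h2 : (negSort l).take t.toNat = negSort l :=
        List.take_of_length_le (by omega)
      rw [h1, h2]
  rw [hkey] at *
  omega

-- ---- B-side lemmas ----

theorem takeWhile_prefix_take (s : List Int) (p : Int → Bool) :
    s.takeWhile p = s.take (s.takeWhile p).length :=
  List.prefix_iff_eq_take.mp (List.takeWhile_prefix p)

theorem getElem_lt_takeWhile_length (s : List Int) (x : Int) (q : Nat) (hq : q < s.length)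
    (h : q < (s.takeWhile (fun v => decide (v ≤ x))).length) : s[q] ≤ x := by
  have hpre := takeWhile_prefix_take s (fun v => decide (v ≤ x))
  have hmem : s[q] ∈ s.takeWhile (fun v => decide (v ≤ x)) := by
    rw [hpre]
    have h2 : q < (s.take (s.takeWhile (fun v => decide (v ≤ x))).length).length := by
      simp [List.length_take]; omega
    have := List.getElem_take (xs := s) (j := (s.takeWhile (fun v => decide (v ≤ x))).length)
      (i := q) (h := h2)
    rw [← this]
    exact List.getElem_mem _
  have := List.mem_takeWhile_imp hmem
  simpa using this

theorem getElem_ge_takeWhile_length (s : List Int) (x : Int) (hs : s.Pairwise (· ≤ ·))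
    (q : Nat) (hq : q < s.length)
    (h : (s.takeWhile (fun v => decide (v ≤ x))).length ≤ q) : x < s[q] := by
  set p : Int → Bool := fun v => decide (v ≤ x) with hp
  set w := (s.takeWhile p).length with hw
  have hwlen : w ≤ s.length := (List.takeWhile_prefix p).length_le
  have hwlt : w < s.length := by omega
  have hdropeq : s.drop w = s.dropWhile p := by
    conv_lhs => rw [← List.takeWhile_append_dropWhile (p := p) (l := s)]
    rw [List.drop_append]
    simp [hw]
  have hdw' : s.drop w ≠ [] := by
    intro hnil
    have := congrArg List.length hnil
    simp [List.length_drop] at this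
    omega
  have hdw : s.dropWhile p ≠ [] := hdropeq ▸ hdw'
  have hhead : p ((s.dropWhile p).head hdw) = false := List.head_dropWhile_not p hdw
  have hsw : x < s[w] := by
    have h1 : (s.drop w).head hdw' = s[w] := List.head_drop hdw'
    have h2 : (s.drop w).head hdw' = (s.dropWhile p).head hdw := by
      congr 1
    rw [← h1, h2]
    simpa [hp] using hhead
  rcases Nat.eq_or_lt_of_le h with heq | hlt
  · subst heq; exact hsw
  · have := List.pairwise_iff_getElem.mp hs w q hwlt hq hlt
    omega

theorem bsearchLoop_eq (s : List Int) (x : Int) (hs : s.Pairwise (· ≤ ·)) :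
    ∀ (fuel : Nat) (lo hi : Int), (hi - lo).toNat ≤ fuel → 0 ≤ lo → lo ≤ hi → hi ≤ (s.length : Int) →
      (∀ (q : Nat) (hq : q < s.length), (q : Int) < lo → s[q] ≤ x) →
      (∀ (q : Nat) (hq : q < s.length), hi ≤ (q : Int) → x < s[q]) →
      bsearchLoop s x lo hi = ((s.takeWhile (fun v => decide (v ≤ x))).length : Int) := by
  set p : Int → Bool := fun v => decide (v ≤ x) with hp
  set w := (s.takeWhile p).length with hw
  have hwlen : w ≤ s.length := (List.takeWhile_prefix p).length_le
  have hww : (s.takeWhile (fun v => decide (v ≤ x))).length = w := by rw [hw, hp]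
  have hfinal : ∀ (lo hi : Int), ¬ lo < hi → 0 ≤ lo → lo ≤ hi → hi ≤ (s.length : Int) →
      (∀ (q : Nat) (hq : q < s.length), (q : Int) < lo → s[q] ≤ x) →
      (∀ (q : Nat) (hq : q < s.length), hi ≤ (q : Int) → x < s[q]) → lo = (w : Int) := by
    intro lo hi hnlt h0 hlh hhi hb ha
    have hlohi : lo = hi := by omega
    rcases lt_trichotomy lo (w : Int) with hc | hc | hc
    · exfalso
      have hq : lo.toNat < s.length := by omega
      have h1 := ha lo.toNat hq (by omega)
      have h2 := getElem_lt_takeWhile_length s x lo.toNat hq (by omega)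
      omega
    · exact hc
    · exfalso
      have hq : w < s.length := by omega
      have h1 := hb w hq (by omega)
      have h2 := getElem_ge_takeWhile_length s x hs w hq (by omega)
      omega
  intro fuel
  induction fuel with
  | zero =>
    intro lo hi hf h0 hlh hhi hb ha
    have hnlt : ¬ lo < hi := by omega
    rw [bsearchLoop, dif_neg hnlt]
    exact hfinal lo hi hnlt h0 hlh hhi hb ha
  | succ fuel ih =>
    intro lo hi hf h0 hlh hhi hb ha
    by_cases hlt : lo < hi
    · rw [bsearchLoop, dif_pos hlt]
      dsimp only
      have hm := PySem.Int.floordiv_two_mid_bounds (le_of_lt hlt)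
      set mid := PySem.Int.floordiv (lo + hi) 2 with hmid
      have hmlt : mid < hi := by
        rw [hmid, PySem.Int.floordiv_lt_iff_lt_mul (by omega)]; omega
      have hmn : mid.toNat < s.length := by omega
      have hmi : ((mid.toNat : Nat) : Int) = mid := by omega
      have hgd : PySem.List.pyGetD s mid 0 = s[mid.toNat] := by
        have h1 : PySem.List.pyGetD s ((mid.toNat : Nat) : Int) 0 = s.getD mid.toNat 0 :=
          PySem.List.pyGetD_natCast s mid.toNat 0
        rw [hmi] at h1
        rw [h1]
        exact List.getD_eq_getElem s 0 hmn
      by_cases hc : PySem.List.pyGetD s mid 0 ≤ x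
      · rw [if_pos hc]
        apply ih (mid + 1) hi (by omega) (by omega) (by omega) hhi
        · intro q hq hql
          by_cases hqlo : (q : Int) < lo
          · exact hb q hq hqlo
          · rcases Nat.lt_or_ge q mid.toNat with h' | h'
            · have := List.pairwise_iff_getElem.mp hs q mid.toNat hq hmn h'
              rw [hgd] at hc
              omega
            · have hqm : q = mid.toNat := by omega
              subst hqm
              rw [← hgd]
              exact hc
        · exact ha
      · rw [if_neg hc]
        apply ih lo mid (by omega) h0 (by omega) (by omega) hb
        intro q hq hql
        rcases Nat.eq_or_lt_of_le (show mid.toNat ≤ q by omega) with h' | h'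
        · subst h'
          rw [← hgd]
          omega
        · have := List.pairwise_iff_getElem.mp hs mid.toNat q hmn hq h'
          rw [hgd] at hc
          omega
    · rw [bsearchLoop, dif_neg hlt]
      exact hfinal lo hi hlt h0 hlh hhi hb ha

theorem insert_bsearch (s : List Int) (x : Int) (hs : s.Pairwise (· ≤ ·)) :
    PySem.List.insert s (bsearchLoop s x 0 (s.length : Int)) x = insSorted x s := by
  set p : Int → Bool := fun v => decide (v ≤ x) with hp
  set w := (s.takeWhile p).length with hw
  have hwlen : w ≤ s.length := (List.takeWhile_prefix p).length_le
  have hbs : bsearchLoop s x 0 (s.length : Int) = (w : Int) := by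
    apply bsearchLoop_eq s x hs s.length 0 (s.length : Int) (by omega) (by omega) (by omega)
      (by omega)
    · intro q hq hql; omega
    · intro q hq hql; omega
  rw [hbs, PySem.List.insert_natCast s w x hwlen]
  unfold insSorted
  have htake : s.take w = s.takeWhile p := (takeWhile_prefix_take s p).symm
  have hdrop : s.drop w = s.dropWhile p := by
    have hsplit : s.takeWhile p ++ s.dropWhile p = s := List.takeWhile_append_dropWhile
    conv_lhs => rw [← hsplit]
    rw [List.drop_append]
    simp [hw]
  rw [htake, hdrop]

theorem negSort_perm (l₁ l₂ : List Int) (h : l₁.Perm l₂) : negSort l₁ = negSort l₂ := by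
  unfold negSort
  exact PySem.List.sorted_eq_sorted_of_perm _ _ _ (fun a b hab => hab) (h.filter _)

theorem sorted_dropWhile_gt (s : List Int) (x : Int) (hs : s.Pairwise (· ≤ ·)) :
    ∀ y ∈ s.dropWhile (fun v => decide (v ≤ x)), x < y := by
  induction s with
  | nil => simp
  | cons a t ih =>
    rw [List.pairwise_cons] at hs
    by_cases h : a ≤ x
    · rw [List.dropWhile_cons_of_pos (by simpa using h)]
      exact ih hs.2
    · rw [List.dropWhile_cons_of_neg (by simpa using h)]
      intro y hy
      rcases List.mem_cons.mp hy with rfl | hyt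
      · omega
      · have := hs.1 y hyt
        omega

theorem negSort_append_neg (l : List Int) (x : Int) (hx : x < 0) :
    negSort (l ++ [x]) = insSorted x (negSort l) := by
  have hsort : (negSort l).Pairwise (· ≤ ·) := by
    have := PySem.List.sorted_pairwise (l.filter (fun v => decide (v < 0))) (fun v => v)
    simpa [negSort] using this
  set p : Int → Bool := fun v => decide (v ≤ x) with hp
  show PySem.List.sorted ((l ++ [x]).filter (fun v => decide (v < 0))) (fun v => v) false
      = insSorted x (negSort l)
  apply PySem.List.sorted_id_eq_of_perm_of_pairwise
  · have h2 : ((negSort l).takeWhile p ++ x :: (negSort l).dropWhile p).Perm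
        (x :: ((negSort l).takeWhile p ++ (negSort l).dropWhile p)) := List.perm_middle
    have h3 : (negSort l).takeWhile p ++ (negSort l).dropWhile p = negSort l :=
      List.takeWhile_append_dropWhile
    have h4 : (negSort l).Perm (l.filter (fun v => decide (v < 0))) :=
      PySem.List.sorted_perm _ _ _
    have h5 : (l ++ [x]).filter (fun v => decide (v < 0))
        = l.filter (fun v => decide (v < 0)) ++ [x] := by
      simp [List.filter_append, hx]
    show (insSorted x (negSort l)).Perm ((l ++ [x]).filter (fun v => decide (v < 0)))
    rw [h5]
    rw [h3] at h2
    exact h2.trans ((h4.cons x).trans (List.perm_append_singleton x _).symm)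
  · show ((negSort l).takeWhile p ++ x :: (negSort l).dropWhile p).Pairwise (· ≤ ·)
    rw [List.pairwise_append]
    refine ⟨hsort.sublist (List.takeWhile_sublist _), ?_, ?_⟩
    · rw [List.pairwise_cons]
      refine ⟨fun y hy => le_of_lt (sorted_dropWhile_gt _ x hsort y hy), ?_⟩
      exact hsort.sublist (List.dropWhile_sublist _)
    · intro a ha b hb
      have ha' : a ≤ x := by simpa [hp] using List.mem_takeWhile_imp ha
      rcases List.mem_cons.mp hb with rfl | hb'
      · exact ha'
      · have := sorted_dropWhile_gt _ x hsort b hb'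
        omega

theorem negSort_append_nonneg (l : List Int) (x : Int) (hx : ¬ x < 0) :
    negSort (l ++ [x]) = negSort l := by
  unfold negSort
  simp [List.filter_append, hx]

theorem takeWhile_take (p : Int → Bool) (s : List Int) (b : Nat) :
    (s.take b).takeWhile p = (s.takeWhile p).take b := by
  induction s generalizing b with
  | nil => simp
  | cons a t ih =>
    cases b with
    | zero => simp
    | succ b =>
      by_cases h : p a
      · simp [h, ih]
      · simp [h]

theorem dropWhile_take (p : Int → Bool) (s : List Int) (b : Nat) :
    (s.take b).dropWhile p = (s.dropWhile p).take (b - (s.takeWhile p).length) := by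
  induction s generalizing b with
  | nil => simp
  | cons a t ih =>
    cases b with
    | zero => simp
    | succ b =>
      by_cases h : p a
      · simp [h, ih]
      · simp [h]

theorem take_insSorted_take (s : List Int) (x : Int) (b m : Nat) (hmb : m ≤ b) :
    ((insSorted x (s.take b)).take m) = (insSorted x s).take m := by
  unfold insSorted
  set p : Int → Bool := fun v => decide (v ≤ x) with hp
  set w := (s.takeWhile p).length with hw
  rw [takeWhile_take, dropWhile_take, List.take_append, List.take_append]
  have hwtake : ((s.takeWhile p).take b).length = min b w := by
    simp [List.length_take, hw]
  have htww : (s.takeWhile p).length = w := rfl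
  rw [List.take_take, hwtake, htww]
  have h1 : min m b = m := by omega
  rw [h1]
  congr 1
  by_cases hbw : b ≤ w
  · have hmin : min b w = b := by omega
    rw [hmin]
    have hz1 : m - b = 0 := by omega
    have hz2 : m - w = 0 := by omega
    rw [hz1, hz2]
    simp
  · have hmin : min b w = w := by omega
    rw [hmin]
    cases hmw : m - w with
    | zero => simp
    | succ q =>
      simp only [List.take_succ_cons]
      congr 1
      rw [List.take_take]
      congr 1
      omega

theorem popLoop_eq (cap : Int) (s : List Int) (S : Int) (hc : 0 ≤ cap) :
    popLoop cap s S = (s.take cap.toNat, S - (s.drop cap.toNat).sum) := by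
  fun_induction popLoop cap s S with
  | case1 negs S hne hlt ih =>
    rw [ih]
    have hlen : cap.toNat ≤ negs.length - 1 := by omega
    have hdt : negs.dropLast.take cap.toNat = negs.take cap.toNat := by
      rw [List.dropLast_eq_take, List.take_take]
      congr 1; omega
    have hds : (negs.drop cap.toNat).sum
        = (negs.dropLast.drop cap.toNat).sum + negs.getLast hne := by
      conv_lhs => rw [← List.dropLast_append_getLast hne]
      rw [List.drop_append]
      have h0 : cap.toNat - negs.dropLast.length = 0 := by
        simp only [List.length_dropLast]; omega
      rw [h0]
      simp
    rw [hdt]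
    refine Prod.ext rfl ?_
    simp only [hds]; ring
  | case2 negs S hne hge =>
    have hlen : negs.length ≤ cap.toNat := by omega
    rw [List.take_of_length_le hlen, List.drop_eq_nil_of_le hlen]
    simp
  | case3 negs S hne =>
    have : negs = [] := by simpa using hne
    subst this; simp

-- the body of B's inner loop, as a named function (proof helper; definitionally the port's lambda)
def bStep (n k : Int) (vs : List Int) (i : Int) (st : Int × List Int × Int × Int) (j : Int) :
    Int × List Int × Int × Int :=
  let st1 :=
    if j > 0 then
      let p := n - j
      if p < (vs.length : Int) then
        let x := PySem.List.pyGetD vs p 0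
        let total := st.1 + x
        if x < 0 then
          let lo := bsearchLoop st.2.1 x 0 (st.2.1.length : Int)
          (total, PySem.List.insert st.2.1 lo x, st.2.2.1 + x)
        else (total, st.2.1, st.2.2.1)
      else (st.1, st.2.1, st.2.2.1)
    else (st.1, st.2.1, st.2.2.1)
  let ps := popLoop (k - i - j) st1.2.1 st1.2.2
  let cand := st1.1 - ps.2
  (st1.1, ps.1, ps.2, if cand > st.2.2.2 then cand else st.2.2.2)

-- B's loop state before iteration J (J = 0: the initialisation; J ≥ 1: after iteration J-1)
def stateB (n k : Int) (vs : List Int) (i : Int) : Nat → Int × List Int × Int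
  | 0 => ((PySem.List.slice vs none (some i)).sum + (PySem.List.slice vs (some n) none).sum,
      negSort (selList i n vs), (negSort (selList i n vs)).sum)
  | (J + 1) =>
      ((selList i (n - (J : Int)) vs).sum,
       (negSort (selList i (n - (J : Int)) vs)).take (k - i - (J : Int)).toNat,
       ((negSort (selList i (n - (J : Int)) vs)).take (k - i - (J : Int)).toNat).sum)

theorem solve_alt_eq_fold (n k : Int) (vs : List Int) :
    solve_alt n k vs = (PySem.List.pyRange 0 (min (n+1) (k+1)) 1).foldl (fun ans i =>
      ((PySem.List.pyRange 0 (min (n+1-i) (k+1-i)) 1).foldl (bStep n k vs i)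
        ((stateB n k vs i 0).1, (stateB n k vs i 0).2.1, (stateB n k vs i 0).2.2, ans)).2.2.2) 0 :=
  rfl

theorem ifmax (a b : Int) : (if b > a then b else a) = max a b := by
  split_ifs with h
  · exact (max_eq_right (le_of_lt h)).symm
  · exact (max_eq_left (not_lt.mp h)).symm

theorem negSort_pairwise (l : List Int) : (negSort l).Pairwise (· ≤ ·) := by
  have := PySem.List.sorted_pairwise (l.filter (fun v => decide (v < 0))) (fun v => v)
  simpa [negSort] using this

theorem sum_take_drop (l : List Int) (c : Nat) : (l.take c).sum + (l.drop c).sum = l.sum := by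
  rw [← List.sum_append, List.take_append_drop]

theorem insSorted_sum (x : Int) (s : List Int) : (insSorted x s).sum = s.sum + x := by
  unfold insSorted
  have h : ((s.takeWhile (fun v => decide (v ≤ x))) ++ x :: (s.dropWhile (fun v => decide (v ≤ x)))).Perm
      (x :: ((s.takeWhile (fun v => decide (v ≤ x))) ++ (s.dropWhile (fun v => decide (v ≤ x))))) :=
    List.perm_middle
  rw [h.sum_eq, List.sum_cons, List.takeWhile_append_dropWhile]
  ring

theorem bStep_state (n k : Int) (vs : List Int) (i : Int)
    (h0 : 0 ≤ i) (hin : i ≤ n) (hik : i ≤ k) (J : Nat)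
    (hJ : (J : Int) < min (n+1-i) (k+1-i)) (ans : Int) :
    bStep n k vs i
      ((stateB n k vs i J).1, (stateB n k vs i J).2.1, (stateB n k vs i J).2.2, ans) (J : Int)
    = ((stateB n k vs i (J+1)).1, (stateB n k vs i (J+1)).2.1, (stateB n k vs i (J+1)).2.2,
       max ans (aVal n k vs i (J : Int))) := by
  cases J with
  | zero =>
    unfold bStep stateB
    simp only [Nat.cast_zero, sub_zero]
    rw [if_neg (by omega : ¬ (0:Int) > 0)]
    try dsimp only
    rw [popLoop_eq _ _ _ (by omega : (0:Int) ≤ k - i)]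
    try dsimp only
    have hsel : (PySem.List.slice vs none (some i)).sum + (PySem.List.slice vs (some n) none).sum
        = (selList i n vs).sum := by
      unfold selList; rw [List.sum_append]
    have htd := sum_take_drop (negSort (selList i n vs)) (k - i).toNat
    have hval := aVal_eq_gval n k vs i 0 (by omega)
    unfold gval at hval
    simp only [sub_zero] at hval
    refine Prod.ext hsel (Prod.ext rfl (Prod.ext (by dsimp only; omega) ?_))
    try dsimp only
    rw [ifmax]
    congr 1
    omega
  | succ J' =>
    have hj1 : (1:Int) ≤ ((J' + 1 : Nat) : Int) := by push_cast; omega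
    have hjn : ((J' + 1 : Nat) : Int) ≤ n - i := by
      rw [lt_min_iff] at hJ; omega
    have hjk : ((J' + 1 : Nat) : Int) ≤ k - i := by
      rw [lt_min_iff] at hJ; omega
    have hp0 : (0:Int) ≤ n - ((J' + 1 : Nat) : Int) := by omega
    have hcapc : (0:Int) ≤ k - i - ((J' + 1 : Nat) : Int) := by omega
    have hcprev : ((J' : Nat) : Int) = ((J' + 1 : Nat) : Int) - 1 := by push_cast; ring
    unfold bStep
    simp only [stateB]
    rw [if_pos (by omega : ((J' + 1 : Nat) : Int) > 0)]
    try dsimp only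
    -- abbreviations
    have hsortedPrev : ((negSort (selList i (n - (J' : Int)) vs)).take
        (k - i - (J' : Int)).toNat).Pairwise (· ≤ ·) :=
      (negSort_pairwise _).sublist (List.take_sublist _ _)
    by_cases hpm : n - ((J' + 1 : Nat) : Int) < (vs.length : Int)
    · rw [if_pos hpm]
      try dsimp only
      have hlt : (n - ((J' + 1 : Nat) : Int)).toNat < vs.length := by omega
      have hxg : PySem.List.pyGetD vs (n - ((J' + 1 : Nat) : Int)) 0
          = vs[(n - ((J' + 1 : Nat) : Int)).toNat] :=
        PySem.List.pyGetD_eq_getElem vs 0 hp0 hpm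
      rw [hxg]
      have hdropP : PySem.List.slice vs (some (n - ((J' + 1 : Nat) : Int))) none
          = vs.drop (n - ((J' + 1 : Nat) : Int)).toNat := PySem.List.slice_from _ hp0
      have hdropP' : PySem.List.slice vs (some (n - (J' : Int))) none
          = vs.drop (n - (J' : Int)).toNat := PySem.List.slice_from _ (by omega)
      have hidx : (n - (J' : Int)).toNat = (n - ((J' + 1 : Nat) : Int)).toNat + 1 := by
        push_cast; omega
      have hcons : vs.drop (n - ((J' + 1 : Nat) : Int)).toNat
          = vs[(n - ((J' + 1 : Nat) : Int)).toNat] :: vs.drop ((n - ((J' + 1 : Nat) : Int)).toNat + 1) :=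
        (List.getElem_cons_drop hlt).symm
      have hperm : (selList i (n - ((J' + 1 : Nat) : Int)) vs).Perm
          (selList i (n - (J' : Int)) vs ++ [vs[(n - ((J' + 1 : Nat) : Int)).toNat]]) := by
        unfold selList
        rw [hdropP, hdropP', hidx, hcons]
        exact List.perm_middle.trans (List.perm_append_singleton _ _).symm
      have hsum : (selList i (n - ((J' + 1 : Nat) : Int)) vs).sum
          = (selList i (n - (J' : Int)) vs).sum + vs[(n - ((J' + 1 : Nat) : Int)).toNat] := by
        rw [hperm.sum_eq, List.sum_append]
        simp
      have hval := aVal_eq_gval n k vs i ((J' + 1 : Nat) : Int) (by omega)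
      unfold gval at hval
      by_cases hneg : vs[(n - ((J' + 1 : Nat) : Int)).toNat] < 0
      · rw [if_pos hneg]
        try dsimp only
        rw [insert_bsearch _ _ hsortedPrev]
        rw [popLoop_eq _ _ _ hcapc]
        try dsimp only
        have hns : negSort (selList i (n - ((J' + 1 : Nat) : Int)) vs)
            = insSorted (vs[(n - ((J' + 1 : Nat) : Int)).toNat])
                (negSort (selList i (n - (J' : Int)) vs)) :=
          (negSort_perm _ _ hperm).trans (negSort_append_neg _ _ hneg)
        have hnegs : (insSorted (vs[(n - ((J' + 1 : Nat) : Int)).toNat])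
              ((negSort (selList i (n - (J' : Int)) vs)).take (k - i - (J' : Int)).toNat)).take
                (k - i - ((J' + 1 : Nat) : Int)).toNat
            = (negSort (selList i (n - ((J' + 1 : Nat) : Int)) vs)).take
                (k - i - ((J' + 1 : Nat) : Int)).toNat := by
          rw [take_insSorted_take _ _ _ _ (by omega : (k - i - ((J' + 1 : Nat) : Int)).toNat ≤ (k - i - (J' : Int)).toNat), ← hns]
        have hinsum := insSorted_sum (vs[(n - ((J' + 1 : Nat) : Int)).toNat])
          ((negSort (selList i (n - (J' : Int)) vs)).take (k - i - (J' : Int)).toNat)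
        have htd := sum_take_drop (insSorted (vs[(n - ((J' + 1 : Nat) : Int)).toNat])
          ((negSort (selList i (n - (J' : Int)) vs)).take (k - i - (J' : Int)).toNat))
          (k - i - ((J' + 1 : Nat) : Int)).toNat
        refine Prod.ext ?_ (Prod.ext hnegs (Prod.ext ?_ ?_))
        · try dsimp only
          omega
        · try dsimp only
          rw [← hnegs] at *
          omega
        · try dsimp only
          rw [ifmax]
          congr 1
          rw [← hnegs] at hval
          rw [hval]
          omega
      · rw [if_neg hneg]
        try dsimp only
        rw [popLoop_eq _ _ _ hcapc]
        try dsimp only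
        have hns : negSort (selList i (n - ((J' + 1 : Nat) : Int)) vs)
            = negSort (selList i (n - (J' : Int)) vs) :=
          (negSort_perm _ _ hperm).trans (negSort_append_nonneg _ _ hneg)
        have hnegs : ((negSort (selList i (n - (J' : Int)) vs)).take
              (k - i - (J' : Int)).toNat).take (k - i - ((J' + 1 : Nat) : Int)).toNat
            = (negSort (selList i (n - ((J' + 1 : Nat) : Int)) vs)).take
                (k - i - ((J' + 1 : Nat) : Int)).toNat := by
          rw [List.take_take, hns]
          congr 1
          omega
        have htd := sum_take_drop ((negSort (selList i (n - (J' : Int)) vs)).take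
          (k - i - (J' : Int)).toNat) (k - i - ((J' + 1 : Nat) : Int)).toNat
        refine Prod.ext ?_ (Prod.ext hnegs (Prod.ext ?_ ?_))
        · try dsimp only
          omega
        · try dsimp only
          rw [← hnegs] at *
          omega
        · try dsimp only
          rw [ifmax]
          congr 1
          rw [← hnegs] at hval
          rw [hval]
          omega
    · rw [if_neg hpm]
      try dsimp only
      rw [popLoop_eq _ _ _ hcapc]
      try dsimp only
      have hleq : selList i (n - ((J' + 1 : Nat) : Int)) vs = selList i (n - (J' : Int)) vs := by
        unfold selList
        rw [PySem.List.slice_from _ hp0, PySem.List.slice_from _ (by omega : (0:Int) ≤ n - (J' : Int))]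
        rw [List.drop_eq_nil_of_le (by omega), List.drop_eq_nil_of_le (by omega)]
      have hval := aVal_eq_gval n k vs i ((J' + 1 : Nat) : Int) (by omega)
      unfold gval at hval
      have hnegs : ((negSort (selList i (n - (J' : Int)) vs)).take
            (k - i - (J' : Int)).toNat).take (k - i - ((J' + 1 : Nat) : Int)).toNat
          = (negSort (selList i (n - ((J' + 1 : Nat) : Int)) vs)).take
              (k - i - ((J' + 1 : Nat) : Int)).toNat := by
        rw [List.take_take, hleq]
        congr 1
        omega
      have htd := sum_take_drop ((negSort (selList i (n - (J' : Int)) vs)).take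
        (k - i - (J' : Int)).toNat) (k - i - ((J' + 1 : Nat) : Int)).toNat
      refine Prod.ext ?_ (Prod.ext hnegs (Prod.ext ?_ ?_))
      · try dsimp only
        rw [hleq]
      · try dsimp only
        rw [← hnegs] at *
        omega
      · try dsimp only
        rw [ifmax]
        congr 1
        rw [← hnegs] at hval
        rw [hval, hleq]
        omega

theorem inner_inv (n k : Int) (vs : List Int) (i : Int)
    (h0 : 0 ≤ i) (hin : i ≤ n) (hik : i ≤ k) :
    ∀ (J : Nat), (J : Int) ≤ min (n+1-i) (k+1-i) → ∀ ans,
      (PySem.List.pyRange 0 (J : Int) 1).foldl (bStep n k vs i)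
        ((stateB n k vs i 0).1, (stateB n k vs i 0).2.1, (stateB n k vs i 0).2.2, ans)
      = ((stateB n k vs i J).1, (stateB n k vs i J).2.1, (stateB n k vs i J).2.2,
         (PySem.List.pyRange 0 (J : Int) 1).foldl
           (fun a j => max a (aVal n k vs i j)) ans) := by
  intro J
  induction J with
  | zero =>
    intro _ ans
    simp [PySem.List.pyRange_one_eq_nil]
  | succ J ih =>
    intro hJ ans
    have hJ' : (J : Int) < min (n+1-i) (k+1-i) := by push_cast at hJ ⊢; omega
    have hc : ((J + 1 : Nat) : Int) = (J : Int) + 1 := by push_cast; ring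
    rw [hc, PySem.List.pyRange_one_succ_right (by positivity),
      List.foldl_append, List.foldl_append, ih (by omega) ans]
    simp only [List.foldl_cons, List.foldl_nil]
    exact bStep_state n k vs i h0 hin hik J hJ' _

-- ===== VERDICT (by name: the statement is the Claim_ definition above) =====
theorem solve_spec : Claim_equal_solve := by
  intro n k vs _hdom
  unfold Spec_solve
  rw [solve_eq_fold, solve_alt_eq_fold]
  apply PySem.List.foldl_congr_mem
  intro ans i hi
  have hmem := PySem.List.mem_pyRange_one.mp hi
  have h0i : 0 ≤ i := hmem.1
  have hin : i ≤ n := by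
    have := hmem.2
    rw [lt_min_iff] at this
    omega
  have hik : i ≤ k := by
    have := hmem.2
    rw [lt_min_iff] at this
    omega
  have hM0 : (0:Int) ≤ min (n+1-i) (k+1-i) := by
    rw [le_min_iff]
    omega
  have hMc : (((min (n+1-i) (k+1-i)).toNat : Nat) : Int) = min (n+1-i) (k+1-i) := by omega
  have hinv := inner_inv n k vs i h0i hin hik (min (n+1-i) (k+1-i)).toNat (by omega) ans
  rw [hMc] at hinv
  rw [hinv]
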